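-- pv_equiv track=rewrite | github.com/yz4004/codeforce-python | daily/problem_list/2025/0604.py | solve
-- ===== SOURCE A (Python) =====
-- from math import comb, factorial, inf
--
-- mx = lambda x, y: x if x > y else y
--
-- mn = lambda x, y: y if x > y else x
--
-- def solve(n,k, mat):
--
--     # 前i个矩阵提供k分
--     # 某个矩阵提供的分数 1 2 ... a*b 的分别对应最小花费
--
--     costs = []
--     for x,y in mat: # 100 * n
--         cost = []
--         t = mn(x+y, k)
--         for i in range(1, t+1):
--             tmp = inf
--             # i = r + i-r
--             # (r,i-r)
--             # r<x, i-r<y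
--             for r in range(mx(0,i-y), mn(i, x)+1):
--                 c = i-r
--                 tmp = mn(tmp, r*y + c*x - r*c)
--             cost.append(tmp)
--         costs.append(cost)
--
--     # f[i] 凑够分数i的最小花费 （前i个矩阵）
--     f = [inf]*(k+1)
--     f[0] = 0
--
--     for cost in costs:
--         # g = [0] + [inf] * k
--         g = f[:]
--
--         for j,c in enumerate(cost, 1):
--             # for i in range(j, k+1):
--             # for i in range(k, j-1, -1):
--             #     f[i] = mn(f[i-j] + c, f[i])
--
--             for i in range(j, k + 1):
--                 g[i] = mn(f[i - j] + c, g[i])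
--         f = g
--     return f[k] if f[k] < inf else -1
-- ===== SOURCE B (Python) =====
-- # Same DP, but each per-matrix cost entry comes from the closed-form integer
-- # minimum of the convex quadratic r*y + (i-r)*x - r*(i-r) (vertex clamped to
-- # the feasible interval) instead of scanning all r; the knapsack pass builds
-- # the new row per target score i instead of updating it in place per item j.
--
-- def _vertex_cost(x, y, i):
--     # min over r in [max(0,i-y), min(i,x)] of r*y + (i-r)*x - r*(i-r):
--     # a convex quadratic in r, minimised at the clamped rounded vertex.
--     lo, hi = max(0, i - y), min(i, x)
--     if lo > hi:
--         return None
--     r = min(max((x + i - y + 1) // 2, lo), hi)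
--     return r * y + (i - r) * x - r * (i - r)
--
-- def solve(n, k, mat):
--     f = [0] + [None] * k
--     for x, y in mat:
--         t = min(x + y, k)
--         cost = [_vertex_cost(x, y, i) for i in range(1, t + 1)]
--         def best(i):
--             b = f[i]
--             for j in range(1, min(i, t) + 1):
--                 a, c = f[i - j], cost[j - 1]
--                 if a is not None and c is not None and (b is None or a + c < b):
--                     b = a + c
--             return b
--         f = [best(i) for i in range(k + 1)]
--     return -1 if f[k] is None else f[k]
-- ===== Notes on version B (the rewrite author's own statement) =====
-- stated objective: alternative
-- what changed: Each per-matrix cost entry is computed in O(1) as the convex quadratic r*y+(i-r)*x-r*(i-r) evaluated at its rounded vertex clamped to [max(0,i-y),min(i,x)], replacing A's inner scan over all splits r, and the knapsack row is rebuilt per target score i (reading only the previous row) instead of updated in place per item j.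
import Mathlib
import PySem

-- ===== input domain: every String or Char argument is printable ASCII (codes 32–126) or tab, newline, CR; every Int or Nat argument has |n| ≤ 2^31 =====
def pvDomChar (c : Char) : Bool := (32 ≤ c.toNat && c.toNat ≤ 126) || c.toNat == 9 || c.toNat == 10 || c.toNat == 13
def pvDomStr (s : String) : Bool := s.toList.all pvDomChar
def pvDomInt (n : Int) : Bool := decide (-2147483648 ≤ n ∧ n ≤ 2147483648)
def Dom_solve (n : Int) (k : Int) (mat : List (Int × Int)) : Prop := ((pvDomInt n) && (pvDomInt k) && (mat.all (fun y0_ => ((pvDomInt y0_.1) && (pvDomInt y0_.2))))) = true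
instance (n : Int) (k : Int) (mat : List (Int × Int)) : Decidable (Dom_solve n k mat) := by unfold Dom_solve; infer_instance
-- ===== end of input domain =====

-- B replaces A's inner scan over splits r by the closed-form clamped vertex of the
-- convex quadratic, and rebuilds the knapsack row per target score i instead of
-- updating it in place per item j.  The DP array (a Python list) is modeled in
-- port A as a function Int → Option Int (none = math.inf); all Python reads/writes
-- to it are at in-range indices under Pre_solve, so the model is exact there.

-- ===== PORT A =====
-- mn/mx lambdas of the module
def pvMn (a b : Int) : Int := if a > b then b else a
def pvMx (a b : Int) : Int := if a > b then a else b
-- extended values: none = math.inf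
def pvGtE : Option Int → Option Int → Bool
  | none, none => false
  | none, some _ => true
  | some _, none => false
  | some a, some b => a > b
def pvMnE (x y : Option Int) : Option Int := if pvGtE x y then y else x
def pvAddE : Option Int → Option Int → Option Int
  | some a, some b => some (a + b)
  | _, _ => none

-- inner r-loop: tmp = mn(tmp, r*y + c*x - r*c) for r in range(mx(0,i-y), mn(i,x)+1)
def pvTmpA (x y i : Int) : Option Int :=
  (PySem.List.pyRange (pvMx 0 (i - y)) (pvMn i x + 1) 1).foldl
    (fun tmp r => pvMnE tmp (some (r * y + (i - r) * x - r * (i - r)))) none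

-- cost list for one matrix: for i in range(1, mn(x+y,k)+1): cost.append(tmp)
def pvCostListA (k x y : Int) : List (Option Int) :=
  (PySem.List.pyRange 1 (pvMn (x + y) k + 1) 1).foldl
    (fun cost i => cost ++ [pvTmpA x y i]) []

-- one knapsack pass: g = f[:]; for j,c in enumerate(cost,1): for i in range(j,k+1): g[i] = mn(f[i-j]+c, g[i])
-- (all reads/writes are at in-range indices under Pre_solve, so pyGetD/set are exact there)
def pvKnapA (k : Int) (f : List (Option Int)) (cost : List (Option Int)) : List (Option Int) :=
  (cost.foldl
    (fun (gj : List (Option Int) × Int) c =>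
      ((PySem.List.pyRange gj.2 (k + 1) 1).foldl
          (fun g i => g.set i.toNat (pvMnE (pvAddE (PySem.List.pyGetD f (i - gj.2) none) c)
                                           (PySem.List.pyGetD g i none))) gj.1,
        gj.2 + 1))
    (f, 1)).1

def solve (n : Int) (k : Int) (mat : List (Int × Int)) : Int :=
  let costs := mat.foldl (fun costs p => costs ++ [pvCostListA k p.1 p.2]) []
  let f0 := (List.replicate (k + 1).toNat (none : Option Int)).set 0 (some 0)  -- f = [inf]*(k+1); f[0] = 0
  let f := costs.foldl (pvKnapA k) f0
  match PySem.List.pyGetD f k none with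
  | some v => v
  | none => -1

-- ===== PORT B =====
-- closed-form per-matrix cost (None = infeasible)
def pvVertexCost (x y i : Int) : Option Int :=
  let lo := max 0 (i - y)
  let hi := min i x
  if lo > hi then none
  else
    let r := min (max (PySem.Int.floordiv (x + i - y + 1) 2) lo) hi
    some (r * y + (i - r) * x - r * (i - r))

-- best(i): b = f[i]; for j in 1..min(i,t): relax with f[i-j] + cost[j-1]
def pvBestB (f cost : List (Option Int)) (t i : Int) : Option Int :=
  (PySem.List.pyRange 1 (min i t + 1) 1).foldl
    (fun b j =>
      match PySem.List.pyGetD f (i - j) none, PySem.List.pyGetD cost (j - 1) none with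
      | some a, some c =>
        match b with
        | none => some (a + c)
        | some b' => if a + c < b' then some (a + c) else b
      | _, _ => b)
    (PySem.List.pyGetD f i none)

def pvKnapB (k : Int) (f : List (Option Int)) (p : Int × Int) : List (Option Int) :=
  let t := min (p.1 + p.2) k
  let cost := (PySem.List.pyRange 1 (t + 1) 1).map (pvVertexCost p.1 p.2)
  (PySem.List.pyRange 0 (k + 1) 1).map (pvBestB f cost t)

def solve_alt (n : Int) (k : Int) (mat : List (Int × Int)) : Int :=
  let f := mat.foldl (pvKnapB k) (some 0 :: List.replicate k.toNat none)  -- f = [0] + [None]*k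
  match PySem.List.pyGetD f k none with
  | some v => v
  | none => -1

-- ===== PRECONDITION & SPEC =====
-- A raises IndexError (f[0] on an empty list) exactly when k < 0.
def Pre_solve (n : Int) (k : Int) (mat : List (Int × Int)) : Prop := 0 ≤ k
instance (n : Int) (k : Int) (mat : List (Int × Int)) : Decidable (Pre_solve n k mat) := by unfold Pre_solve; infer_instance
def pvWitness_solve : Int × Int × (List (Int × Int)) := (2, 3, [(2, 2), (1, 4)])

def Spec_solve (n : Int) (k : Int) (mat : List (Int × Int)) (out : Int) : Prop := out = solve_alt n k mat
instance (n : Int) (k : Int) (mat : List (Int × Int)) (out : Int) : Decidable (Spec_solve n k mat out) := by unfold Spec_solve; infer_instance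

-- ===== CLAIM (what is proved, stated in full; the proofs are below) =====
def Claim_equal_solve : Prop := ∀ (n : Int) (k : Int) (mat : List (Int × Int)), Dom_solve n k mat → Pre_solve n k mat → Spec_solve n k mat (solve n k mat)

-- ===== LEMMAS AND PROOFS =====

theorem pvMn_eq_min (a b : Int) : pvMn a b = min a b := by
  unfold pvMn; split_ifs <;> omega

theorem pvMx_eq_max (a b : Int) : pvMx a b = max a b := by
  unfold pvMx; split_ifs <;> omega

theorem pvMnE_some_some (a b : Int) : pvMnE (some a) (some b) = some (min a b) := by
  simp only [pvMnE, pvGtE]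
  split_ifs with h <;> simp_all <;> omega

theorem pvMnE_none_some (b : Int) : pvMnE none (some b) = some b := by rfl

-- fold of running min, starting from a finite value
theorem foldl_mnE_some (q : Int → Int) (l : List Int) : ∀ (a : Int),
    l.foldl (fun tmp r => pvMnE tmp (some (q r))) (some a)
      = some (l.foldl (fun a r => min a (q r)) a) := by
  induction l with
  | nil => intro a; rfl
  | cons r l ih => intro a; simp only [List.foldl_cons, pvMnE_some_some, ih]

-- a fold of min hits an element that is ≤ everything
theorem foldl_min_eq (l : List Int) : ∀ (a m : Int), (m = a ∨ m ∈ l) → m ≤ a →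
    (∀ b ∈ l, m ≤ b) → l.foldl min a = m := by
  induction l with
  | nil =>
    intro a m hm h1 _
    rcases hm with rfl | h
    · simp
    · simp at h
  | cons b l ih =>
    intro a m hm h1 h2
    simp only [List.foldl_cons]
    apply ih
    · rcases hm with h | h
      · left; subst h; have := h2 b (by simp); omega
      · simp at h
        rcases h with h | h
        · left; subst h; have : m ≤ a := h1; omega
        · right; exact h
    · have := h2 b (by simp); omega
    · intro c hc; exact h2 c (by simp [hc])

-- the quadratic q r = r*y + (i-r)*x - r*(i-r) is minimised on [lo,hi] at the clamped rounded vertex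
theorem vertex_is_min (x y i lo hi r rs : Int)
    (hrs : rs = min (max (PySem.Int.floordiv (x + i - y + 1) 2) lo) hi)
    (hlo : lo ≤ r) (hhi : r ≤ hi) :
    rs * y + (i - rs) * x - rs * (i - rs) ≤ r * y + (i - r) * x - r * (i - r) := by
  set s := x + i - y with hs
  have hmb : 2 * PySem.Int.floordiv (s + 1) 2 ≤ s + 1 ∧ s ≤ 2 * PySem.Int.floordiv (s + 1) 2 := by
    rw [PySem.Int.floordiv_eq_ediv_of_pos (by omega : (0:Int) < 2)]; omega
  set m := PySem.Int.floordiv (s + 1) 2 with hm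
  have key : 0 ≤ (r - rs) * (r + rs - s) := by
    rcases lt_trichotomy r rs with h | h | h
    · have h1 : 0 ≤ rs - r := by omega
      have h2' : 0 ≤ s - (r + rs) := by omega
      nlinarith [mul_nonneg h1 h2']
    · simp [h]
    · have h1 : 0 ≤ r - rs := by omega
      have h2' : 0 ≤ r + rs - s := by omega
      exact mul_nonneg h1 h2'
  nlinarith [key]

-- closed form = A's inner scan
theorem tmpA_eq_vertex (x y i : Int) : pvTmpA x y i = pvVertexCost x y i := by
  unfold pvTmpA pvVertexCost
  rw [pvMx_eq_max, pvMn_eq_min]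
  set lo := max 0 (i - y) with hlo
  set hi := min i x with hhi
  by_cases h : lo > hi
  · rw [PySem.List.pyRange_one_eq_nil (by omega)]
    simp [h]
  · replace h : lo ≤ hi := by omega
    simp only [if_neg (by omega : ¬ lo > hi)]
    set rs := min (max (PySem.Int.floordiv (x + i - y + 1) 2) lo) hi with hrs
    have hrsb : lo ≤ rs ∧ rs ≤ hi := by omega
    rw [PySem.List.pyRange_one_cons (by omega : lo < hi + 1)]
    simp only [List.foldl_cons, pvMnE_none_some]
    rw [foldl_mnE_some]
    congr 1
    rw [show (fun (a : Int) (r : Int) => min a (r * y + (i - r) * x - r * (i - r)))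
          = (fun a r => min a ((fun r => r * y + (i - r) * x - r * (i - r)) r)) from rfl,
        ← List.foldl_map]
    apply foldl_min_eq
    · rcases eq_or_lt_of_le hrsb.1 with h1 | h1
      · left; rw [← h1]
      · right
        exact List.mem_map.mpr ⟨rs, PySem.List.mem_pyRange_one.mpr (by omega), rfl⟩
    · exact vertex_is_min x y i lo hi lo rs hrs (le_refl lo) h
    · intro b hb
      obtain ⟨r, hr, rfl⟩ := List.mem_map.mp hb
      have hr' := PySem.List.mem_pyRange_one.mp hr
      exact vertex_is_min x y i lo hi r rs hrs (by omega) (by omega)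

-- A's cost list is a map
theorem costListA_eq_map (k x y : Int) :
    pvCostListA k x y = (PySem.List.pyRange 1 (min (x + y) k + 1) 1).map (pvVertexCost x y) := by
  unfold pvCostListA
  rw [pvMn_eq_min, PySem.List.foldl_append_singleton_eq_map]
  simp [tmpA_eq_vertex]

-- folding in-place updates over a Nodup list of indices: length is preserved
theorem foldl_set_length (h : Int → Option Int → Option Int) (l : List Int) :
    ∀ (g : List (Option Int)),
    (l.foldl (fun g j => g.set j.toNat (h j (PySem.List.pyGetD g j none))) g).length = g.length := by
  induction l with
  | nil => intro g; rfl
  | cons a l ih => intro g; simp only [List.foldl_cons]; rw [ih, List.length_set]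

-- folding in-place updates over a Nodup list of nonneg indices, read at one in-range point
theorem foldl_set_eval (h : Int → Option Int → Option Int) (l : List Int) :
    ∀ (g : List (Option Int)) (i : Int), l.Nodup → (∀ j ∈ l, 0 ≤ j) → 0 ≤ i →
    i < (g.length : Int) →
    PySem.List.pyGetD (l.foldl (fun g j => g.set j.toNat (h j (PySem.List.pyGetD g j none))) g) i none
      = if i ∈ l then h i (PySem.List.pyGetD g i none) else PySem.List.pyGetD g i none := by
  induction l with
  | nil => intro g i _ _ _ _; simp
  | cons a l ih =>
    intro g i hnd hpos hi0 hilen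
    simp only [List.foldl_cons]
    rw [ih _ _ (List.nodup_cons.mp hnd).2 (fun j hj => hpos j (by simp [hj])) hi0
        (by rw [List.length_set]; exact hilen)]
    have ha0 : 0 ≤ a := hpos a (by simp)
    by_cases hia : i = a
    · subst hia
      have hnl : i ∉ l := (List.nodup_cons.mp hnd).1
      rw [if_neg hnl, if_pos (by simp)]
      rw [PySem.List.pyGetD_eq_getElem _ _ hi0 (by rw [List.length_set]; exact_mod_cast hilen)]
      rw [List.getElem_set_self]
    · have hne : i.toNat ≠ a.toNat := by omega
      have hgi : PySem.List.pyGetD (g.set a.toNat (h a (PySem.List.pyGetD g a none))) i none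
          = PySem.List.pyGetD g i none := by
        rw [PySem.List.pyGetD_eq_getElem _ _ hi0 (by rw [List.length_set]; exact_mod_cast hilen),
            PySem.List.pyGetD_eq_getElem _ _ hi0 (by exact_mod_cast hilen)]
        exact List.getElem_set_ne (show a.toNat ≠ i.toNat by omega) _
      rw [hgi]
      by_cases hil : i ∈ l <;> simp [hia, hil]

-- A's double loop, evaluated at one point i, is a scalar fold over cost with a counter and guard
theorem knapA_eval (k : Int) (f : List (Option Int)) (cost : List (Option Int)) :
    ∀ (J : Int) (g0 : List (Option Int)) (i : Int), 1 ≤ J → 0 ≤ i → i < (g0.length : Int) →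
    PySem.List.pyGetD ((cost.foldl
      (fun (gj : List (Option Int) × Int) c =>
        ((PySem.List.pyRange gj.2 (k + 1) 1).foldl
            (fun g i => g.set i.toNat (pvMnE (pvAddE (PySem.List.pyGetD f (i - gj.2) none) c)
                                             (PySem.List.pyGetD g i none))) gj.1,
          gj.2 + 1))
      (g0, J)).1) i none
    = (cost.foldl
        (fun (bj : Option Int × Int) c =>
          ((if bj.2 ≤ i ∧ i ≤ k then pvMnE (pvAddE (PySem.List.pyGetD f (i - bj.2) none) c) bj.1 else bj.1), bj.2 + 1))
        (PySem.List.pyGetD g0 i none, J)).1 := by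
  induction cost with
  | nil => intro J g0 i _ _ _; rfl
  | cons c cost ih =>
    intro J g0 i hJ hi0 hilen
    simp only [List.foldl_cons]
    rw [ih (J + 1) _ i (by omega) hi0 (by rw [foldl_set_length]; exact hilen)]
    congr 1
    rw [foldl_set_eval _ _ _ _ (PySem.List.nodup_pyRange_one _ _)
        (fun j hj => by have := PySem.List.mem_pyRange_one.mp hj; omega) hi0 hilen]
    by_cases hc : J ≤ i ∧ i < k + 1
    · rw [if_pos (PySem.List.mem_pyRange_one.mpr hc), if_pos (by omega : J ≤ i ∧ i ≤ k)]
    · rw [if_neg (fun hmem => hc (PySem.List.mem_pyRange_one.mp hmem)),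
          if_neg (by omega : ¬ (J ≤ i ∧ i ≤ k))]

-- pvKnapA preserves the row length
theorem knapA_length (k : Int) (f cost : List (Option Int)) :
    (pvKnapA k f cost).length = f.length := by
  unfold pvKnapA
  suffices h : ∀ (J : Int) (g0 : List (Option Int)),
      ((cost.foldl
        (fun (gj : List (Option Int) × Int) c =>
          ((PySem.List.pyRange gj.2 (k + 1) 1).foldl
              (fun g i => g.set i.toNat (pvMnE (pvAddE (PySem.List.pyGetD f (i - gj.2) none) c)
                                               (PySem.List.pyGetD g i none))) gj.1,
            gj.2 + 1))
        (g0, J)).1).length = g0.length by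
    exact h 1 f
  induction cost with
  | nil => intro J g0; rfl
  | cons c cost ih =>
    intro J g0
    simp only [List.foldl_cons]
    rw [ih (J + 1), foldl_set_length]

-- the guarded scalar fold with a counter is a fold over the range of valid j, reading cost by index
theorem guard_fold (f : List (Option Int)) (k i : Int) (hik : i ≤ k) (cost : List (Option Int)) :
    ∀ (J : Int) (b : Option Int),
    (cost.foldl
        (fun (bj : Option Int × Int) c =>
          ((if bj.2 ≤ i ∧ i ≤ k then pvMnE (pvAddE (PySem.List.pyGetD f (i - bj.2) none) c) bj.1 else bj.1), bj.2 + 1))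
        (b, J)).1
    = (PySem.List.pyRange J (min (i + 1) (J + cost.length)) 1).foldl
        (fun b j => pvMnE (pvAddE (PySem.List.pyGetD f (i - j) none) (PySem.List.pyGetD cost (j - J) none)) b) b := by
  induction cost with
  | nil =>
    intro J b
    rw [PySem.List.pyRange_one_eq_nil (by simp)]
    rfl
  | cons c cost ih =>
    intro J b
    simp only [List.foldl_cons, List.length_cons, Nat.cast_add, Nat.cast_one]
    by_cases hJ : J ≤ i
    · rw [if_pos ⟨hJ, hik⟩]
      rw [PySem.List.pyRange_one_cons (by omega : J < min (i + 1) (J + ((cost.length : Int) + 1)))]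
      simp only [List.foldl_cons]
      rw [ih (J + 1)]
      have harr : min (i + 1) (J + 1 + (cost.length : Int)) = min (i + 1) (J + ((cost.length : Int) + 1)) := by omega
      rw [harr]
      have hsub : PySem.List.pyGetD (c :: cost) (J - J) none = c := by
        rw [sub_self]; exact PySem.List.pyGetD_zero_cons c cost none
      rw [hsub]
      apply PySem.List.foldl_congr_mem
      intro b' j hj
      have hj' := PySem.List.mem_pyRange_one.mp hj
      have hidx : PySem.List.pyGetD cost (j - (J + 1)) none = PySem.List.pyGetD (c :: cost) (j - J) none := by
        rw [PySem.List.pyGetD_eq_getElem (i := j - (J + 1)) cost none (by omega) (by omega),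
            PySem.List.pyGetD_eq_getElem (i := j - J) (c :: cost) none (by omega) (by simp; omega)]
        have h1 : (j - J).toNat = (j - (J + 1)).toNat + 1 := by omega
        simp [h1]
      rw [hidx]
    · rw [if_neg (by omega)]
      rw [ih (J + 1)]
      rw [PySem.List.pyRange_one_eq_nil (by omega), PySem.List.pyRange_one_eq_nil (by omega)]
      rfl
  -- (the two ranges are both empty when J > i)


-- A's relax step equals B's relax step, pointwise
theorem step_eq (a c b : Option Int) :
    pvMnE (pvAddE a c) b
      = (match a, c with
        | some a', some c' =>
          match b with
          | none => some (a' + c')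
          | some b' => if a' + c' < b' then some (a' + c') else b
        | _, _ => b) := by
  rcases a with _ | a <;> rcases c with _ | c <;> rcases b with _ | b <;>
    simp [pvMnE, pvAddE, pvGtE] <;> split_ifs <;> simp_all <;> omega

-- one knapsack pass: A's in-place version agrees with B's row rebuild on [0,k]
theorem knap_step_eq (k : Int) (hk : 0 ≤ k) (x y : Int)
    (fA fB : List (Option Int)) (hlenA : (fA.length : Int) = k + 1)
    (hf : ∀ i, 0 ≤ i → i ≤ k → PySem.List.pyGetD fA i none = PySem.List.pyGetD fB i none)
    (i : Int) (hi0 : 0 ≤ i) (hik : i ≤ k) :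
    PySem.List.pyGetD (pvKnapA k fA (pvCostListA k x y)) i none
      = PySem.List.pyGetD (pvKnapB k fB (x, y)) i none := by
  unfold pvKnapA pvKnapB
  rw [knapA_eval k fA _ 1 fA i (le_refl 1) hi0 (by omega), guard_fold fA k i hik]
  rw [PySem.List.pyGetD_map_pyRange_of_nonneg _ _ _ _ hi0 (by omega)]
  unfold pvBestB
  rw [costListA_eq_map]
  set t := min (x + y) k with ht
  set costB := (PySem.List.pyRange 1 (t + 1) 1).map (pvVertexCost x y) with hcost
  have hlen : (costB.length : Int) = max t 0 := by
    rw [hcost, List.length_map, PySem.List.length_pyRange_one]; omega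
  by_cases ht0 : 0 ≤ t
  · have hrange : min (i + 1) (1 + (costB.length : Int)) = min i t + 1 := by omega
    rw [hrange, hf i hi0 hik]
    apply PySem.List.foldl_congr_mem
    intro b j hj
    have hj' := PySem.List.mem_pyRange_one.mp hj
    rw [step_eq]
    rw [hf (i - j) (by omega) (by omega)]
  · rw [PySem.List.pyRange_one_eq_nil (by omega), PySem.List.pyRange_one_eq_nil (by omega)]
    exact hf i hi0 hik

-- the whole fold over mat preserves the pointwise invariant
theorem main_inv (k : Int) (hk : 0 ≤ k) (mat : List (Int × Int)) :
    ∀ (fA fB : List (Option Int)), (fA.length : Int) = k + 1 →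
    (∀ i, 0 ≤ i → i ≤ k → PySem.List.pyGetD fA i none = PySem.List.pyGetD fB i none) →
    ∀ i, 0 ≤ i → i ≤ k →
      PySem.List.pyGetD ((mat.map (fun p => pvCostListA k p.1 p.2)).foldl (pvKnapA k) fA) i none
        = PySem.List.pyGetD (mat.foldl (pvKnapB k) fB) i none := by
  induction mat with
  | nil => intro fA fB _ hf i hi0 hik; exact hf i hi0 hik
  | cons p mat ih =>
    intro fA fB hlenA hf i hi0 hik
    simp only [List.map_cons, List.foldl_cons]
    exact ih _ _ (by rw [knapA_length]; exact hlenA)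
      (fun i' hi0' hik' => by
        rcases p with ⟨x, y⟩
        exact knap_step_eq k hk x y fA fB hlenA hf i' hi0' hik')
      i hi0 hik

-- ===== VERDICT (by name: the statement is the Claim_ definition above) =====
theorem solve_spec : Claim_equal_solve := by
  intro n k mat _ hpre
  unfold Spec_solve solve solve_alt
  have hk : 0 ≤ k := hpre
  rw [PySem.List.foldl_append_singleton_eq_map]
  simp only [List.nil_append]
  have h := main_inv k hk mat ((List.replicate (k + 1).toNat (none : Option Int)).set 0 (some 0))
      (some 0 :: List.replicate k.toNat none)
      (by simp [List.length_set, List.length_replicate]; omega)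
      (by
        intro i hi0 hik
        by_cases h0 : i = 0
        · subst h0
          rw [PySem.List.pyGetD_eq_getElem _ _ (le_refl 0) (by simp; omega)]
          rw [PySem.List.pyGetD_zero_cons]
          simp
        · rw [PySem.List.pyGetD_eq_getElem (i := i) _ none (by omega)
                (by simp [List.length_set, List.length_replicate]; omega),
              PySem.List.pyGetD_eq_getElem (i := i) (some 0 :: List.replicate k.toNat none) none
                (by omega) (by simp; omega)]
          rw [List.getElem_set_ne (by omega), List.getElem_cons]
          simp [show i.toNat ≠ 0 by omega])
      k hk (le_refl k)
  rw [h]
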